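-- pv_equiv track=rewrite | github.com/chrisculver/WickContractions | examples/Nc_baryon.py | get_symmetric_states
-- ===== SOURCE A (Python) =====
-- import itertools
--
-- def check_symmetric(Nc, state1, state2):
--     symmetric = False
--     # break apart into quarks
--     quarks = [state2[i:i + 2] for i in range(0, 2 * Nc, 2)]
--     quark_permutations = itertools.permutations(quarks, Nc)
--     # put string back together
--     quark_permutations = [''.join(perm) for perm in quark_permutations]
--     if state1 in quark_permutations:
--         symmetric = True
--     return symmetric
--
-- def get_symmetric_states(Nc, all_states):
--     if len(all_states) == 1:
--         return [all_states]
--     # make list of sublists containing states related by interchanging 2 quarks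
--     symmetric_states = []
--     # loop over all states to place them into a sublist
--     for i, state2 in enumerate(all_states):
--         # i=0 0th state is already placed into a sublist
--         if i == 0:
--             pass
--         # states to compare this state to are a representative state from each sublist
--         state1_list = [symmetric_states[n][0] for n in range(len(symmetric_states))]
--         # loop over representatives list until a match is found
--         found_symmetric = False
--         for n, state1 in enumerate(state1_list):
--             if check_symmetric(Nc, state1, state2):
--                 # if found match, put this state into the correct sublist
--                 found_symmetric = True
--                 symmetric_states[n].append(state2)
--                 break
--         # if no match is found, start a new sublist
--         if found_symmetric is False:
--             symmetric_states.append([state2])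
--
--     return symmetric_states
-- ===== SOURCE B (Python) =====
-- def _quarks(Nc, state):
--     return [state[i:i + 2] for i in range(0, 2 * Nc, 2)]
--
--
-- def _can_build(target, chunks):
--     # can `target` be written as a concatenation of the multiset `chunks`?
--     # backtracking over distinct candidate chunks instead of enumerating all
--     # len(chunks)! permutations and joining them
--     if not chunks:
--         return target == ''
--     for c in dict.fromkeys(chunks):
--         if target.startswith(c):
--             rest = list(chunks)
--             rest.remove(c)
--             if _can_build(target[len(c):], rest):
--                 return True
--     return False
--
--
-- def _place(Nc, buckets, state):
--     # put `state` into the first bucket whose representative (first element)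
--     # is buildable from state's quark chunks, else open a new bucket
--     for b in buckets:
--         if _can_build(b[0], _quarks(Nc, state)):
--             b.append(state)
--             return buckets
--     buckets.append([state])
--     return buckets
--
--
-- def get_symmetric_states(Nc, all_states):
--     if len(all_states) == 1:
--         return [all_states]
--     buckets = []
--     for state in all_states:
--         buckets = _place(Nc, buckets, state)
--     return buckets
-- ===== Notes on version B (the rewrite author's own statement) =====
-- stated objective: alternative
-- what changed: A tests each state against a bucket representative by materialising all Nc! joined quark permutations and doing a list membership test; B instead runs a backtracking prefix match over the multiset of quark chunks, trying only distinct candidate chunks, so duplicate quarks never multiply the work.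
import Mathlib
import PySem

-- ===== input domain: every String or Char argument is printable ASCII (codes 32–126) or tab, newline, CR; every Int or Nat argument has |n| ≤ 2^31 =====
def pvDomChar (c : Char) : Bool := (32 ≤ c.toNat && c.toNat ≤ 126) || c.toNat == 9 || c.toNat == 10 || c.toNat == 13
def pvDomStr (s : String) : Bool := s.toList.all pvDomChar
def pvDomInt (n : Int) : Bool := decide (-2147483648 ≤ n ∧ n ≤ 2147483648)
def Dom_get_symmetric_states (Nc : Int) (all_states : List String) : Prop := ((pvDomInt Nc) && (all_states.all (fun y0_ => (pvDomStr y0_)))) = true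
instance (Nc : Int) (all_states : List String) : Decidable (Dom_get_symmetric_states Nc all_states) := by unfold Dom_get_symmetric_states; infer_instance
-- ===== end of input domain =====

-- B replaces A's per-comparison enumeration of all Nc! joined quark permutations by a
-- backtracking prefix match over the multiset of quark chunks (distinct candidates only).

-- ===== PORT A =====
-- quarks = [state2[i:i + 2] for i in range(0, 2 * Nc, 2)]
def pyQuarksA (Nc : Int) (state2 : String) : List String :=
  (PySem.List.pyRange 0 (2 * Nc) 2).map (fun i => PySem.Str.slice state2 (some i) (some (i + 2)))

-- itertools.permutations(quarks, Nc): PySem.List.permutations; Nc.toNat is exact for 0 ≤ Nc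
-- (Nc < 0 makes Python raise ValueError — excluded by Pre_).
def check_symmetric (Nc : Int) (state1 state2 : String) : Bool :=
  let quarks := pyQuarksA Nc state2
  let quark_permutations := (PySem.List.permutations quarks Nc.toNat).map (fun perm => PySem.Str.join "" perm)
  quark_permutations.contains state1

-- one iteration of A's outer loop; indices n and [0] are in range by construction
-- (n < len(symmetric_states), every sublist nonempty), so pyGetD's default is never taken — exact.
def stepA (Nc : Int) (symmetric_states : List (List String)) (state2 : String) : List (List String) :=
  let state1_list := (PySem.List.pyRange 0 (PySem.List.len symmetric_states) 1).map
      (fun n => PySem.List.pyGetD (PySem.List.pyGetD symmetric_states n []) 0 "")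
  match state1_list.findIdx? (fun state1 => check_symmetric Nc state1 state2) with
  | some n => symmetric_states.set n (PySem.List.pyGetD symmetric_states (n : Int) [] ++ [state2])
  | none => symmetric_states ++ [[state2]]

def get_symmetric_states (Nc : Int) (all_states : List String) : List (List String) :=
  if all_states.length == 1 then [all_states]
  else all_states.foldl (stepA Nc) []

-- ===== PORT B =====
def pyQuarksB (Nc : Int) (state : String) : List String :=
  (PySem.List.pyRange 0 (2 * Nc) 2).map (fun i => PySem.Str.slice state (some i) (some (i + 2)))

-- _can_build: backtracking over dict.fromkeys(chunks) (= PySem.List.dedup);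
-- fuel = chunks.length only makes the recursion structural (each call removes one chunk);
-- c ∈ chunks there, so rest.remove(c) succeeds and remove?'s .getD [] is never taken — exact.
def canBuildFuel : Nat → String → List String → Bool
  | _, target, [] => target == ""
  | 0, _, _ => false   -- unreachable: fuel starts at chunks.length and drops by 1 with it
  | fuel + 1, target, chunks =>
    (PySem.List.dedup chunks).any (fun c =>
      PySem.Str.startswith target c &&
      canBuildFuel fuel (PySem.Str.slice target (some (PySem.Str.len c)) none)
        ((PySem.List.remove? chunks c).getD []))

def canBuild (target : String) (chunks : List String) : Bool :=
  canBuildFuel chunks.length target chunks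

-- _place: first-match scan over the buckets
def placeB (Nc : Int) (buckets : List (List String)) (state : String) : List (List String) :=
  match buckets with
  | [] => [[state]]
  | b :: rest =>
    if canBuild (PySem.List.pyGetD b 0 "") (pyQuarksB Nc state) then (b ++ [state]) :: rest
    else b :: placeB Nc rest state

def get_symmetric_states_alt (Nc : Int) (all_states : List String) : List (List String) :=
  if all_states.length == 1 then [all_states]
  else all_states.foldl (placeB Nc) []

-- ===== PRECONDITION & SPEC =====
-- Pre_ excludes only the inputs where A raises: Nc < 0 with at least two states makes
-- itertools.permutations(quarks, Nc) raise ValueError; everywhere else A returns.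
def Pre_get_symmetric_states (Nc : Int) (all_states : List String) : Prop :=
  0 ≤ Nc ∨ all_states.length ≤ 1
instance (Nc : Int) (all_states : List String) : Decidable (Pre_get_symmetric_states Nc all_states) := by unfold Pre_get_symmetric_states; infer_instance

def pvWitness_get_symmetric_states : Int × List String := (2, ["abcd", "cdab", "aaaa"])

def Spec_get_symmetric_states (Nc : Int) (all_states : List String) (out : List (List String)) : Prop := out = get_symmetric_states_alt Nc all_states
instance (Nc : Int) (all_states : List String) (out : List (List String)) : Decidable (Spec_get_symmetric_states Nc all_states out) := by unfold Spec_get_symmetric_states; infer_instance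

-- ===== CLAIM (what is proved, stated in full; the proofs are below) =====
def Claim_equal_get_symmetric_states : Prop := ∀ (Nc : Int) (all_states : List String), Dom_get_symmetric_states Nc all_states → Pre_get_symmetric_states Nc all_states → Spec_get_symmetric_states Nc all_states (get_symmetric_states Nc all_states)

-- ===== LEMMAS AND PROOFS =====

-- ''.join on a list of strings is concatenation
lemma intercalate_nil_eq_flatten (xss : List (List Char)) : [].intercalate xss = xss.flatten := by
  induction xss with
  | nil => rfl
  | cons x xs ih =>
    cases xs with
    | nil => simp [List.intercalate]
    | cons y ys => simp_all [List.intercalate, List.intersperse]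

lemma toList_join_empty (ps : List String) :
    (PySem.Str.join "" ps).toList = (ps.map String.toList).flatten := by
  simp [PySem.Str.toList_join, PySem.Chars.join, intercalate_nil_eq_flatten]

-- target[len(c):] drops the first len(c) characters
lemma toList_slice_from (t c : String) :
    (PySem.Str.slice t (some (PySem.Str.len c)) none).toList = t.toList.drop c.toList.length := by
  rw [PySem.Str.toList_slice, PySem.Chars.slice_eq_listSlice, PySem.Str.len_eq,
      PySem.List.slice_from_natCast]

-- converse of PySem.List.perm_of_mem_permutations
lemma mem_permutations_of_perm {α : Type} [DecidableEq α] (p xs : List α) (h : p.Perm xs) :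
    p ∈ PySem.List.permutations xs xs.length := by
  induction p generalizing xs with
  | nil =>
    have : xs = [] := h.symm.eq_nil
    subst this
    simp [PySem.List.permutations_zero]
  | cons x p' ih =>
    have hx : x ∈ xs := h.subset (List.mem_cons_self)
    have hlen : xs.length = p'.length + 1 := by
      have := h.length_eq; simp at this; omega
    have hi : xs.idxOf x < xs.length := List.idxOf_lt_length_of_mem hx
    have hgi : xs[xs.idxOf x]? = some x := by
      rw [List.getElem?_eq_getElem hi]
      simp [List.getElem_idxOf hi]
    rw [hlen, PySem.List.permutations_succ]
    refine List.mem_flatMap.mpr ⟨xs.idxOf x, List.mem_range.mpr hi, ?_⟩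
    rw [hgi]
    refine List.mem_map.mpr ⟨p', ?_, rfl⟩
    have hperm : p'.Perm (xs.eraseIdx (xs.idxOf x)) := by
      have h2 := PySem.List.perm_cons_eraseIdx xs hgi
      exact (h.trans h2.symm).cons_inv
    have hlen2 : (xs.eraseIdx (xs.idxOf x)).length = p'.length := by
      rw [List.length_eraseIdx_of_lt hi]; omega
    have := ih (xs.eraseIdx (xs.idxOf x)) hperm
    rwa [hlen2] at this

-- characterization of the backtracking matcher: target is a concatenation of a permutation of chunks
lemma canBuildFuel_iff : ∀ (fuel : Nat) (cs : List String), cs.length ≤ fuel → ∀ (t : String),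
    (canBuildFuel fuel t cs = true ↔ ∃ p : List String, p.Perm cs ∧ PySem.Str.join "" p = t) := by
  intro fuel
  induction fuel with
  | zero =>
    intro cs hcs t
    have : cs = [] := List.eq_nil_of_length_eq_zero (by omega)
    subst this
    simp only [canBuildFuel, beq_iff_eq]
    constructor
    · rintro rfl; exact ⟨[], List.Perm.refl _, rfl⟩
    · rintro ⟨p, hp, rfl⟩
      have : p = [] := hp.eq_nil
      subst this; rfl
  | succ fuel ih =>
    intro cs hcs t
    cases cs with
    | nil =>
      simp only [canBuildFuel, beq_iff_eq]
      constructor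
      · rintro rfl; exact ⟨[], List.Perm.refl _, rfl⟩
      · rintro ⟨p, hp, rfl⟩
        have : p = [] := hp.eq_nil
        subst this; rfl
    | cons c0 cs' =>
      simp only [canBuildFuel, List.any_eq_true, Bool.and_eq_true]
      constructor
      · rintro ⟨c, hcd, hsw, hrec⟩
        have hc : c ∈ c0 :: cs' := (PySem.List.mem_dedup _ _).mp hcd
        rw [PySem.List.remove?_eq_some_erase _ _ hc, Option.getD_some] at hrec
        have hlenE : ((c0 :: cs').erase c).length = cs'.length := by
          rw [List.length_erase_of_mem hc]; simp
        obtain ⟨p', hp', hj'⟩ := (ih _ (by rw [hlenE]; simp only [List.length_cons] at hcs; omega) _).mp hrec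
        refine ⟨c :: p', (hp'.cons c).trans (List.perm_cons_erase hc).symm, ?_⟩
        apply String.toList_inj.mp
        rw [toList_join_empty]
        simp only [List.map_cons, List.flatten_cons]
        have hswl : c.toList <+: t.toList := by
          rw [PySem.Str.startswith_eq] at hsw
          exact (PySem.Chars.startswith_iff _ _).mp hsw
        obtain ⟨r, hr⟩ := hswl
        have : (PySem.Str.join "" p').toList = t.toList.drop c.toList.length := by
          rw [hj', toList_slice_from]
        rw [toList_join_empty] at this
        rw [this, ← hr]
        simp
      · rintro ⟨p, hp, rfl⟩
        obtain ⟨c, p', rfl⟩ : ∃ c p', p = c :: p' := by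
          cases p with
          | nil => exact absurd hp.symm.eq_nil (by simp)
          | cons a b => exact ⟨a, b, rfl⟩
        have hc : c ∈ c0 :: cs' := hp.subset List.mem_cons_self
        refine ⟨c, (PySem.List.mem_dedup _ _).mpr hc, ?_, ?_⟩
        · rw [PySem.Str.startswith_eq]
          refine (PySem.Chars.startswith_iff _ _).mpr ⟨(PySem.Str.join "" p').toList, ?_⟩
          rw [toList_join_empty, toList_join_empty]
          simp
        · rw [PySem.List.remove?_eq_some_erase _ _ hc, Option.getD_some]
          have hlenE : ((c0 :: cs').erase c).length = cs'.length := by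
            rw [List.length_erase_of_mem hc]; simp
          refine (ih _ (by rw [hlenE]; simp only [List.length_cons] at hcs; omega) _).mpr ⟨p', ?_, ?_⟩
          · exact (hp.trans (List.perm_cons_erase hc)).cons_inv
          · apply String.toList_inj.mp
            rw [toList_slice_from, toList_join_empty, toList_join_empty]
            simp

lemma canBuild_iff (cs : List String) (t : String) :
    canBuild t cs = true ↔ ∃ p : List String, p.Perm cs ∧ PySem.Str.join "" p = t :=
  canBuildFuel_iff cs.length cs le_rfl t

lemma quarksA_length (Nc : Int) (hNc : 0 ≤ Nc) (s : String) :
    (pyQuarksA Nc s).length = Nc.toNat := by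
  unfold pyQuarksA
  rw [PySem.List.pyRange_of_pos 0 (2 * Nc) (by norm_num : (0 : Int) < 2)]
  simp only [List.length_map, List.length_range]
  split_ifs with h
  · omega
  · omega

-- A's check (enumerate all permutations, join, membership) = B's matcher
lemma check_eq_canBuild (Nc : Int) (hNc : 0 ≤ Nc) (s1 s2 : String) :
    check_symmetric Nc s1 s2 = canBuild s1 (pyQuarksB Nc s2) := by
  apply Bool.coe_iff_coe.mp
  simp only [check_symmetric]
  rw [show pyQuarksB = pyQuarksA from rfl]
  rw [List.contains_iff_mem, List.mem_map, canBuild_iff]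
  constructor
  · rintro ⟨p, hmem, hj⟩
    rw [← quarksA_length Nc hNc s2] at hmem
    exact ⟨p, PySem.List.perm_of_mem_permutations hmem, hj⟩
  · rintro ⟨p, hperm, hj⟩
    refine ⟨p, ?_, hj⟩
    have := mem_permutations_of_perm p _ hperm
    rwa [quarksA_length Nc hNc s2] at this

-- A's first-match scan and index update = B's recursive placement
lemma scan_eq_placeB (Nc : Int) (hNc : 0 ≤ Nc) (st : String) : ∀ (sym : List (List String)),
    (match (sym.map (fun b => PySem.List.pyGetD b 0 "")).findIdx?
        (fun state1 => check_symmetric Nc state1 st) with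
     | some n => sym.set n (PySem.List.pyGetD sym (n : Int) [] ++ [st])
     | none => sym ++ [[st]]) = placeB Nc sym st := by
  intro sym
  induction sym with
  | nil => simp [placeB]
  | cons b rest ih =>
    simp only [List.map_cons, List.findIdx?_cons]
    by_cases hcb : check_symmetric Nc (PySem.List.pyGetD b 0 "") st = true
    · simp only [hcb, if_true, placeB]
      rw [check_eq_canBuild Nc hNc] at hcb
      simp [hcb, PySem.List.pyGetD_zero_cons]
    · simp only [hcb, placeB]
      have hcb' : canBuild (PySem.List.pyGetD b 0 "") (pyQuarksB Nc st) = false := by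
        rw [← check_eq_canBuild Nc hNc]; simpa using hcb
      rw [hcb']
      simp only [Bool.false_eq_true, if_false]
      cases hfi : (rest.map (fun b => PySem.List.pyGetD b 0 "")).findIdx?
          (fun state1 => check_symmetric Nc state1 st) with
      | none =>
        rw [hfi] at ih
        simp only [Option.map_none]
        simpa using congrArg (b :: ·) ih
      | some n =>
        rw [hfi] at ih
        simp only [Option.map_some]
        have hget : PySem.List.pyGetD (b :: rest) ((n + 1 : Nat) : Int) [] =
            PySem.List.pyGetD rest (n : Int) [] := by
          rw [PySem.List.pyGetD_natCast, PySem.List.pyGetD_natCast]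
          simp [List.getD]
        rw [hget, List.set_cons_succ]
        simpa using congrArg (b :: ·) ih

lemma stepA_eq_placeB (Nc : Int) (hNc : 0 ≤ Nc) (sym : List (List String)) (st : String) :
    stepA Nc sym st = placeB Nc sym st := by
  have hmap : (PySem.List.pyRange 0 (PySem.List.len sym) 1).map
      (fun n => PySem.List.pyGetD (PySem.List.pyGetD sym n []) 0 "")
      = sym.map (fun b => PySem.List.pyGetD b 0 "") := by
    calc (PySem.List.pyRange 0 (PySem.List.len sym) 1).map
          (fun n => PySem.List.pyGetD (PySem.List.pyGetD sym n []) 0 "")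
        = ((PySem.List.pyRange 0 (PySem.List.len sym) 1).map
            (fun n => PySem.List.pyGetD sym n [])).map
            (fun b => PySem.List.pyGetD b 0 "") := by rw [List.map_map]; rfl
      _ = sym.map (fun b => PySem.List.pyGetD b 0 "") := by
            rw [PySem.List.map_pyGetD_pyRange_zero]
  simp only [stepA]
  rw [hmap]
  exact scan_eq_placeB Nc hNc st sym

-- ===== VERDICT (by name: the statement is the Claim_ definition above) =====
theorem get_symmetric_states_spec : Claim_equal_get_symmetric_states := by
  intro Nc all_states _ hpre
  unfold Spec_get_symmetric_states
  unfold get_symmetric_states get_symmetric_states_alt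
  by_cases h1 : all_states.length == 1
  · simp [h1]
  · simp only [h1, Bool.false_eq_true, if_false]
    rcases hpre with hNc | hle
    · rw [show stepA Nc = placeB Nc from funext fun s => funext fun t => stepA_eq_placeB Nc hNc s t]
    · have h0 : all_states.length = 0 := by
        have : all_states.length ≠ 1 := by simpa using h1
        omega
      rw [List.eq_nil_of_length_eq_zero h0]
      rfl
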